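-- pv_equiv track=rewrite | github.com/robdrynkin/ydb | ydb/tools/memory_no_ydb_repro/run_local_packing_compare.py | interleave_ccd
-- ===== SOURCE A (Python) =====
-- def interleave_ccd(cpu_range):
--     cpus = list(cpu_range)
--     block = 8
--     groups = [cpus[i:i + block] for i in range(0, len(cpus), block)]
--     out = []
--     for offset in range(block):
--         for group in groups:
--             if offset < len(group):
--                 out.append(group[offset])
--     return out
-- ===== SOURCE B (Python) =====
-- def interleave_ccd(cpu_range):
--     cpus = list(cpu_range)
--     out = []
--     for offset in range(8):
--         for i in range(offset, len(cpus), 8):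
--             out.append(cpus[i])
--     return out
-- ===== Notes on version B (the rewrite author's own statement) =====
-- stated objective: simpler
-- what changed: B drops A's intermediate list-of-8-blocks (slice comprehension plus a guarded group[offset] scan) and emits the same interleaving directly by strided index ranges range(offset, len(cpus), 8) over the flat list.
import Mathlib
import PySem

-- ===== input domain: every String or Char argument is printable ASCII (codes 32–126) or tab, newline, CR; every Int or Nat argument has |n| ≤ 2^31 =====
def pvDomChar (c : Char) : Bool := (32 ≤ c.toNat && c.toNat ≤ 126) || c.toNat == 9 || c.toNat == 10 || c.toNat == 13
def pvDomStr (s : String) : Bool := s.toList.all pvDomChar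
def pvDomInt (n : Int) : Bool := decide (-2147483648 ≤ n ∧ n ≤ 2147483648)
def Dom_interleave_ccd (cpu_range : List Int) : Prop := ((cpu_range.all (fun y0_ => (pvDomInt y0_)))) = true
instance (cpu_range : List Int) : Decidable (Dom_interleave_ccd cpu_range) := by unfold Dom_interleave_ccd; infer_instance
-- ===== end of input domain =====

-- B drops the intermediate list of 8-blocks and reads the flat list by stride-8 index ranges (objective: simpler).

-- ===== PORT A =====
-- literal port of A: build the 8-blocks, then for each offset 0..7 append group[offset] of every
-- group long enough (the guard makes the index in range, so pyGetD's default 0 is never used)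
def interleave_ccd (cpu_range : List Int) : List Int :=
  let cpus := cpu_range
  let block : Int := 8
  let groups := (PySem.List.pyRange 0 (cpus.length : Int) block).map
    (fun i => PySem.List.slice cpus (some i) (some (i + block)))
  (PySem.List.pyRange 0 block 1).foldl (fun out offset =>
    groups.foldl (fun out group =>
      if offset < (group.length : Int) then out ++ [PySem.List.pyGetD group offset 0] else out) out) []

-- ===== PORT B =====
-- literal port of B: for each offset 0..7 append cpus[i] for i in range(offset, len(cpus), 8)
def interleave_ccd_alt (cpu_range : List Int) : List Int :=
  let cpus := cpu_range
  (PySem.List.pyRange 0 8 1).foldl (fun out offset =>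
    (PySem.List.pyRange offset (cpus.length : Int) 8).foldl (fun out i =>
      out ++ [PySem.List.pyGetD cpus i 0]) out) []

-- ===== PRECONDITION & SPEC =====
def Spec_interleave_ccd (cpu_range : List Int) (out : List Int) : Prop := out = interleave_ccd_alt cpu_range
instance (cpu_range : List Int) (out : List Int) : Decidable (Spec_interleave_ccd cpu_range out) := by unfold Spec_interleave_ccd; infer_instance

-- ===== CLAIM (what is proved, stated in full; the proofs are below) =====
def Claim_equal_interleave_ccd : Prop := ∀ (cpu_range : List Int), Dom_interleave_ccd cpu_range → Spec_interleave_ccd cpu_range (interleave_ccd cpu_range)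

-- ===== LEMMAS AND PROOFS =====

-- a filter of range by a '< t' test is a prefix of the range
theorem pv_filter_range_lt (t m : Nat) :
    (List.range m).filter (fun k => decide (k < t)) = List.range (min t m) := by
  induction m with
  | zero => simp
  | succ m ih =>
    rw [List.range_succ, List.filter_append, ih]
    by_cases h : m < t
    · have h1 : min t m = m := by omega
      have h2 : min t (m + 1) = m + 1 := by omega
      simp [h, h1, List.range_succ]
    · have h1 : min t (m + 1) = min t m := by omega
      simp [h, h1]

-- one offset row: A's "offset-th element of every long-enough block" is B's stride-8 read
theorem pv_row (cpus : List Int) (off : Nat) (hoff : off < 8) :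
    ((((PySem.List.pyRange 0 (cpus.length : Int) 8).map
        (fun i => PySem.List.slice cpus (some i) (some (i + 8)))).filter
      (fun g => decide ((off : Int) < (g.length : Int)))).map
        (fun g => PySem.List.pyGetD g (off : Int) 0))
    = (PySem.List.pyRange (off : Int) (cpus.length : Int) 8).map
        (fun i => PySem.List.pyGetD cpus i 0) := by
  have hslice : ∀ k : Nat, PySem.List.slice cpus (some (8 * (k : Int))) (some (8 * (k : Int) + 8))
      = (cpus.drop (8 * k)).take 8 := by
    intro k
    have h := PySem.List.slice_natCast_add cpus (8 * k) 8
    push_cast at h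
    simpa using h
  rw [PySem.List.pyRange_of_pos 0 (cpus.length : Int) (by norm_num),
      PySem.List.pyRange_of_pos (off : Int) (cpus.length : Int) (by norm_num)]
  set n := cpus.length with hn
  set t := (n - off + 7) / 8 with ht
  set m := (n + 7) / 8 with hm
  have hm' : (if (0 : Int) < (n : Int) then (((n : Int) - 0 + 8 - 1) / 8).toNat else 0) = m := by
    split_ifs <;> omega
  have ht' : (if (off : Int) < (n : Int) then (((n : Int) - (off : Int) + 8 - 1) / 8).toNat else 0) = t := by
    split_ifs <;> omega
  rw [hm', ht', List.map_map, List.filter_map, List.map_map]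
  have hlen : ∀ k : Nat, ((cpus.drop (8 * k)).take 8).length = min 8 (n - 8 * k) := by
    intro k; simp [hn]
  have hpred : ∀ k ∈ List.range m,
      ((fun g => decide ((off : Int) < ((g : List Int).length : Int))) ∘
        (fun i => PySem.List.slice cpus (some i) (some (i + 8))) ∘ fun k : Nat => 0 + 8 * (k : Int)) k
      = decide (k < t) := by
    intro k _
    have hiff : off < n - 8 * k ↔ k < t := by omega
    simp only [Function.comp_apply, zero_add]
    simp [hslice k, hlen k, hoff, hiff]
  rw [List.filter_congr hpred, pv_filter_range_lt, List.map_map]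
  have hmin : min t m = t := by omega
  rw [hmin]
  refine List.map_congr_left ?_
  intro k hk
  have hk' : k < t := List.mem_range.mp hk
  have hin : 8 * k + off < n := by omega
  simp only [Function.comp_apply, zero_add]
  rw [hslice k]
  have h1 : PySem.List.pyGetD ((cpus.drop (8 * k)).take 8) ((off : Nat) : Int) 0
      = ((cpus.drop (8 * k)).take 8).getD off 0 := PySem.List.pyGetD_natCast _ _ _
  have h2 : ((cpus.drop (8 * k)).take 8).getD off 0 = cpus.getD (8 * k + off) 0 := by
    simp [List.getD_eq_getElem?_getD, List.getElem?_drop, hoff]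
  have h3 : (off : Int) + 8 * (k : Int) = ((8 * k + off : Nat) : Int) := by push_cast; ring
  rw [h1, h2, h3, PySem.List.pyGetD_natCast]

-- ===== VERDICT (by name: the statement is the Claim_ definition above) =====
theorem interleave_ccd_spec : Claim_equal_interleave_ccd := by
  intro cpu_range _
  unfold Spec_interleave_ccd interleave_ccd interleave_ccd_alt
  refine PySem.List.foldl_congr_mem _ _ _ _ ?_
  intro acc offset hmem
  obtain ⟨h0, h8⟩ := (PySem.List.mem_pyRange_one).mp hmem
  rw [PySem.List.foldl_append_ite (p := fun g => offset < ((g : List Int).length : Int))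
        (f := fun g => PySem.List.pyGetD g offset 0),
      PySem.List.foldl_append_singleton_eq_map]
  have hcast : offset = ((offset.toNat : Nat) : Int) := by omega
  rw [hcast]
  exact congrArg (acc ++ ·) (pv_row cpu_range offset.toNat (by omega))
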